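-- pv_equiv track=rewrite | github.com/scrapinghub/portia | slyd/html.py | _quotify
-- ===== SOURCE A (Python) =====
-- def _quotify(mystr):
--     """
--     quotifies an html tag attribute value.
--     Assumes then, that any ocurrence of ' or " in the
--     string is escaped if original string was quoted
--     with it.
--     So this function does not altere the original string
--     except for quotation at both ends, and is limited just
--     to guess if string must be quoted with '"' or "'"
--     """
--     quote = '"'
--     l = len(mystr)
--     for i in range(l):
--         if mystr[i] == "\\" and i + 1 < l and mystr[i+1] == "'":
--             quote = "'"
--             break
--         elif mystr[i] == "\\" and i + 1 < l and mystr[i+1] == '"':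
--             quote = '"'
--             break
--         elif mystr[i] == "'":
--             quote = '"'
--             break
--         elif mystr[i] == '"':
--             quote = "'"
--             break
--     return quote + mystr + quote
-- ===== SOURCE B (Python) =====
-- def _quotify(mystr):
--     """
--     quotifies an html tag attribute value.
--     Staged passes instead of one scan: run four independent substring
--     searches (escaped and bare quotes of each kind), then take the
--     candidate found at the leftmost position; its kind alone decides
--     the quote character.  At most one token can start at any index, so
--     the minimum is unambiguous and matches the first-hit semantics.
--     """
--     candidates = [
--         (mystr.find("\\'"), "'"),
--         (mystr.find('\\"'), '"'),
--         (mystr.find("'"), '"'),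
--         (mystr.find('"'), "'"),
--     ]
--     best_pos, quote = -1, '"'
--     for pos, q in candidates:
--         if pos != -1 and (best_pos == -1 or pos < best_pos):
--             best_pos, quote = pos, q
--     return quote + mystr + quote
-- ===== Notes on version B (the rewrite author's own statement) =====
-- stated objective: faster
-- what changed: Replaced A's single early-exit index scan with two-char lookahead branches by staged passes: four independent substring searches (str.find for \', \", ', ") followed by an argmin over the found positions; the leftmost token's kind decides the quote.
import Mathlib
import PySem

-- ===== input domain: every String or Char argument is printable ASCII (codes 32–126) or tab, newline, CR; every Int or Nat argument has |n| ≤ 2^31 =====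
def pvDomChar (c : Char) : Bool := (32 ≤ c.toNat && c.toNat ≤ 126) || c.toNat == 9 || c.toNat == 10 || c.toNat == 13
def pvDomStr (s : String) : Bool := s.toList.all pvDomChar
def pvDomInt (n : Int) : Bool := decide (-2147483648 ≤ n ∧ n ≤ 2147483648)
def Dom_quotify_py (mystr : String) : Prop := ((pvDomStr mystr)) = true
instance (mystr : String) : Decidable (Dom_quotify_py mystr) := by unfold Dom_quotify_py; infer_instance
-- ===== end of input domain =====

-- B replaces A's single early-exit scan by four substring searches plus an argmin over the found
-- positions; objective: faster (a timing run measured B faster via C-level str.find).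

-- ===== PORT A =====
-- A's for-loop over range(l) with break: recursion over the index list, state 'quote' threaded.
def quotifyALoop (cs : List Char) (l : Int) (quote : String) : List Int → String
  | [] => quote
  | i :: rest =>
    if PySem.List.pyGet? cs i = some '\\' ∧ i + 1 < l ∧ PySem.List.pyGet? cs (i+1) = some '\'' then "'"
    else if PySem.List.pyGet? cs i = some '\\' ∧ i + 1 < l ∧ PySem.List.pyGet? cs (i+1) = some '"' then "\""
    else if PySem.List.pyGet? cs i = some '\'' then "\""
    else if PySem.List.pyGet? cs i = some '"' then "'"
    else quotifyALoop cs l quote rest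

def quotify_py (mystr : String) : String :=
  let l : Int := PySem.Str.len mystr
  let quote := quotifyALoop mystr.toList l "\"" (PySem.List.pyRange 0 l 1)
  quote ++ mystr ++ quote

-- ===== PORT B =====
-- Source B's loop body over the candidate list: keep (best_pos, quote), replace on a strictly smaller found position.
def quotifyBStep (st : Int × String) (pq : Int × String) : Int × String :=
  if pq.1 ≠ -1 ∧ (st.1 = -1 ∨ pq.1 < st.1) then pq else st

def quotify_py_alt (mystr : String) : String :=
  let candidates : List (Int × String) :=
    [(PySem.Str.find mystr "\\'", "'"),
     (PySem.Str.find mystr "\\\"", "\""),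
     (PySem.Str.find mystr "'", "\""),
     (PySem.Str.find mystr "\"", "'")]
  let r := candidates.foldl quotifyBStep (-1, "\"")
  r.2 ++ mystr ++ r.2

-- ===== PRECONDITION & SPEC =====
def Spec_quotify_py (mystr : String) (out : String) : Prop := out = quotify_py_alt mystr
instance (mystr : String) (out : String) : Decidable (Spec_quotify_py mystr out) := by unfold Spec_quotify_py; infer_instance

-- ===== CLAIM (what is proved, stated in full; the proofs are below) =====
def Claim_equal_quotify_py : Prop := ∀ (mystr : String), Dom_quotify_py mystr → Spec_quotify_py mystr (quotify_py mystr)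

-- ===== LEMMAS AND PROOFS =====

-- A's quote as a pure function of the remaining suffix (with one-char lookahead)
def gA (q : String) : List Char → String
  | [] => q
  | c :: cs =>
    if c = '\\' ∧ cs.head? = some '\'' then "'"
    else if c = '\\' ∧ cs.head? = some '"' then "\""
    else if c = '\'' then "\""
    else if c = '"' then "'"
    else gA q cs

lemma quotifyALoop_eq_gA (q : String) (suf : List Char) : ∀ (pre : List Char),
    quotifyALoop (pre ++ suf) (pre.length + suf.length) q
      (PySem.List.pyRange pre.length (pre.length + suf.length) 1) = gA q suf := by
  induction suf with
  | nil =>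
    intro pre
    simp [PySem.List.pyRange_one_eq_nil, quotifyALoop, gA]
  | cons c cs ih =>
    intro pre
    have hlt : (pre.length : Int) < pre.length + (c :: cs).length := by
      push_cast [List.length_cons]; omega
    rw [PySem.List.pyRange_one_cons hlt]
    have hget : PySem.List.pyGet? (pre ++ c :: cs) pre.length = some c :=
      PySem.List.pyGet?_append_length pre cs c
    have hget1 : PySem.List.pyGet? (pre ++ c :: cs) ((pre.length : Int) + 1) = cs.head? := by
      have := PySem.List.pyGet?_append_right (pre := pre) (ys := c :: cs) (k := 1)
      simpa [List.head?_eq_getElem?] using this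
    have step : quotifyALoop (pre ++ c :: cs) (pre.length + ((c :: cs).length : Int)) q
        (PySem.List.pyRange ((pre.length : Int) + 1) (pre.length + ((c :: cs).length : Int)) 1)
        = gA q cs := by
      have st := ih (pre ++ [c])
      simp only [List.append_assoc, List.singleton_append] at st
      have hlen' : (((pre ++ [c]).length : Nat) : Int) = (pre.length : Int) + 1 := by simp
      rw [hlen'] at st
      have hE : (pre.length : Int) + (((c :: cs).length : Nat) : Int)
          = (pre.length : Int) + 1 + ((cs.length : Nat) : Int) := by
        push_cast [List.length_cons]; ring
      rw [hE]
      exact st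
    by_cases hbs : c = '\\'
    · subst hbs
      by_cases hq1 : cs.head? = some '\''
      · have hne : 0 < cs.length := by cases cs <;> simp_all
        have hlt1 : (pre.length : Int) + 1 < pre.length + (('\\' :: cs).length : Int) := by
          push_cast [List.length_cons]; omega
        simp [quotifyALoop, hget, hget1, gA, hq1, hlt1]
        intro h; rw [h] at hq1; simp at hq1
      · by_cases hq2 : cs.head? = some '\"'
        · have hne : 0 < cs.length := by cases cs <;> simp_all
          have hlt1 : (pre.length : Int) + 1 < pre.length + (('\\' :: cs).length : Int) := by
            push_cast [List.length_cons]; omega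
          simp [quotifyALoop, hget, hget1, gA, hq1, hq2, hlt1]
          intro h; rw [h] at hq2; simp at hq2
        · push_cast [List.length_cons] at step
          simp only [quotifyALoop, hget, hget1, gA, hq1, hq2] at step ⊢
          simp [hq1, hq2, step]
    · by_cases hq : c = '\'' ∨ c = '\"'
      · rcases hq with hq | hq <;> subst hq <;> simp [quotifyALoop, hget, gA]
      · push_neg at hq
        push_cast [List.length_cons] at step
        simp only [quotifyALoop, gA] at step ⊢
        simp [hget, hbs, hq.1, hq.2, step]

-- B's combination of the four found positions, as a function of the positions
def combineQ (p1 p2 p3 p4 : Int) : Int × String :=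
  [(p1, "'"), (p2, "\""), (p3, "\""), (p4, "'")].foldl quotifyBStep (-1, "\"")

-- the position shift performed by dropping one non-matching head char
def shiftP (p : Int) : Int := if p = -1 then -1 else p + 1

lemma combineQ_first (p2 p3 p4 : Int)
    (h2 : p2 = -1 ∨ 1 ≤ p2) (h3 : p3 = -1 ∨ 1 ≤ p3) (h4 : p4 = -1 ∨ 1 ≤ p4) :
    (combineQ 0 p2 p3 p4).2 = "'" := by
  simp only [combineQ, quotifyBStep, List.foldl]
  split_ifs <;> simp_all <;> omega

lemma combineQ_second (p1 p3 p4 : Int)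
    (h1 : p1 = -1 ∨ 1 ≤ p1) (h3 : p3 = -1 ∨ 1 ≤ p3) (h4 : p4 = -1 ∨ 1 ≤ p4) :
    (combineQ p1 0 p3 p4).2 = "\"" := by
  simp only [combineQ, quotifyBStep, List.foldl]
  split_ifs <;> simp_all <;> omega

lemma combineQ_third (p1 p2 p4 : Int)
    (h1 : p1 = -1 ∨ 1 ≤ p1) (h2 : p2 = -1 ∨ 1 ≤ p2) (h4 : p4 = -1 ∨ 1 ≤ p4) :
    (combineQ p1 p2 0 p4).2 = "\"" := by
  simp only [combineQ, quotifyBStep, List.foldl]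
  split_ifs <;> simp_all <;> omega

lemma combineQ_fourth (p1 p2 p3 : Int)
    (h1 : p1 = -1 ∨ 1 ≤ p1) (h2 : p2 = -1 ∨ 1 ≤ p2) (h3 : p3 = -1 ∨ 1 ≤ p3) :
    (combineQ p1 p2 p3 0).2 = "'" := by
  simp only [combineQ, quotifyBStep, List.foldl]
  split_ifs <;> simp_all <;> omega

lemma step_shift (a p : Int) (b q : String) (ha : -1 ≤ a) (hp : -1 ≤ p) :
    quotifyBStep (shiftP a, b) (shiftP p, q)
      = (shiftP ((quotifyBStep (a, b) (p, q)).1), (quotifyBStep (a, b) (p, q)).2) := by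
  simp only [quotifyBStep, shiftP]
  split_ifs <;> first | rfl | (exfalso; omega)

lemma step_ge (a p : Int) (b q : String) (ha : -1 ≤ a) (hp : -1 ≤ p) :
    -1 ≤ (quotifyBStep (a, b) (p, q)).1 := by
  unfold quotifyBStep; split_ifs <;> simp <;> omega

lemma combineQ_shift (q1 q2 q3 q4 : Int) (h1 : -1 ≤ q1) (h2 : -1 ≤ q2) (h3 : -1 ≤ q3) (h4 : -1 ≤ q4) :
    (combineQ (shiftP q1) (shiftP q2) (shiftP q3) (shiftP q4)).2 = (combineQ q1 q2 q3 q4).2 := by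
  have g1 := step_ge (-1) q1 "\"" "'" (by norm_num) h1
  have g2 := step_ge _ q2 (quotifyBStep (-1, "\"") (q1, "'")).2 "\"" g1 h2
  have g3 := step_ge _ q3 (quotifyBStep ((quotifyBStep (-1, "\"") (q1, "'")).1, (quotifyBStep (-1, "\"") (q1, "'")).2) (q2, "\"")).2 "\"" g2 h3
  simp only [combineQ, List.foldl]
  conv_lhs => rw [show ((-1 : Int), ("\"" : String)) = (shiftP (-1), ("\"" : String)) from rfl]
  rw [step_shift _ _ _ _ (by norm_num) h1]
  rw [step_shift _ _ _ _ g1 h2]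
  rw [step_shift _ _ _ _ g2 h3]
  rw [step_shift _ _ _ _ g3 h4]

-- find on a cons: hit at position 0
lemma find_cons_of_prefix (sub : List Char) (c : Char) (cs : List Char)
    (h : sub <+: c :: cs) : PySem.Chars.find (c :: cs) sub = 0 := by
  have hinf : sub <:+: c :: cs := h.isInfix
  have hnn : 0 ≤ PySem.Chars.find (c :: cs) sub := (PySem.Chars.find_nonneg_iff _ _).2 hinf
  have hspec := PySem.Chars.find_spec (s := c :: cs) (sub := sub) hnn
  by_contra hne
  have hpos : 0 < (PySem.Chars.find (c :: cs) sub).toNat := by omega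
  exact hspec.2 0 hpos (by simpa using h)

-- find on a cons: no hit at position 0, shift the tail's result
lemma find_cons_of_not_prefix (sub : List Char) (c : Char) (cs : List Char)
    (h : ¬ sub <+: c :: cs) : PySem.Chars.find (c :: cs) sub = shiftP (PySem.Chars.find cs sub) := by
  by_cases hinf : sub <:+: cs
  · -- tail contains it at first position k; the cons's first hit is k+1
    have hk : 0 ≤ PySem.Chars.find cs sub := (PySem.Chars.find_nonneg_iff _ _).2 hinf
    have hkspec := PySem.Chars.find_spec (s := cs) (sub := sub) hk
    have hinf' : sub <:+: c :: cs := List.infix_cons hinf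
    have hf : 0 ≤ PySem.Chars.find (c :: cs) sub := (PySem.Chars.find_nonneg_iff _ _).2 hinf'
    have hfspec := PySem.Chars.find_spec (s := c :: cs) (sub := sub) hf
    set f := (PySem.Chars.find (c :: cs) sub).toNat with hfdef
    set k := (PySem.Chars.find cs sub).toNat with hkdef
    have hf0 : f ≠ 0 := by
      intro h0
      apply h
      have := hfspec.1
      rw [h0] at this
      simpa using this
    have hdropf : sub <+: cs.drop (f - 1) := by
      have := hfspec.1
      rwa [show f = (f - 1) + 1 by omega, List.drop_succ_cons] at this
    have hkle : k ≤ f - 1 := by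
      by_contra hlt
      exact hkspec.2 (f - 1) (by omega) hdropf
    have hfle : f ≤ k + 1 := by
      by_contra hlt
      exact hfspec.2 (k + 1) (by omega) (by simpa [List.drop_succ_cons] using hkspec.1)
    have : f = k + 1 := by omega
    have hkne : PySem.Chars.find cs sub ≠ -1 := by omega
    simp only [shiftP, if_neg hkne]
    omega
  · have h1 : PySem.Chars.find cs sub = -1 := (PySem.Chars.find_eq_neg_one_iff _ _).2 hinf
    have h2 : PySem.Chars.find (c :: cs) sub = -1 := by
      apply (PySem.Chars.find_eq_neg_one_iff _ _).2
      intro hbig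
      rcases ((PySem.Chars.exists_prefix_drop_iff_isIn sub (c :: cs)).2
        ((PySem.Chars.isIn_iff_infix _ _).2 hbig)) with ⟨j, hj⟩
      cases j with
      | zero => exact h (by simpa using hj)
      | succ j =>
        have hj' : sub <+: cs.drop j := by simpa [List.drop_succ_cons] using hj
        exact hinf (hj'.isInfix.trans (List.drop_suffix j cs).isInfix)
    rw [h1, h2]; rfl

-- prefix tests for the four concrete tokens
lemma single_prefix_iff (x c : Char) (cs : List Char) : [x] <+: c :: cs ↔ c = x := by
  constructor
  · intro h; rcases (List.cons_prefix_cons.1 h) with ⟨h1, _⟩; exact h1.symm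
  · intro h; subst h; simp
lemma pair_prefix_iff (x y c : Char) (cs : List Char) :
    [x, y] <+: c :: cs ↔ c = x ∧ cs.head? = some y := by
  cases cs with
  | nil => simp [List.cons_prefix_cons]
  | cons d ds =>
    simp [List.cons_prefix_cons, eq_comm]

-- B's quote as a function of a char list
def fQ (cs : List Char) : String :=
  (combineQ (PySem.Chars.find cs ['\\', '\''])
            (PySem.Chars.find cs ['\\', '"'])
            (PySem.Chars.find cs ['\''])
            (PySem.Chars.find cs ['"'])).2

lemma shiftP_cases (q : Int) (h : -1 ≤ q) : shiftP q = -1 ∨ 1 ≤ shiftP q := by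
  unfold shiftP; split_ifs <;> omega

lemma gA_eq_fQ (cs : List Char) : gA "\"" cs = fQ cs := by
  induction cs with
  | nil => rfl
  | cons c cs ih =>
    have n1 := PySem.Chars.neg_one_le_find cs ['\\', '\'']
    have n2 := PySem.Chars.neg_one_le_find cs ['\\', '"']
    have n3 := PySem.Chars.neg_one_le_find cs ['\'']
    have n4 := PySem.Chars.neg_one_le_find cs ['"']
    by_cases h1 : c = '\\' ∧ cs.head? = some '\''
    · have f1 : PySem.Chars.find (c :: cs) ['\\', '\''] = 0 :=
        find_cons_of_prefix _ _ _ ((pair_prefix_iff _ _ _ _).2 h1)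
      have f2 := find_cons_of_not_prefix ['\\', '"'] c cs
        (by rw [pair_prefix_iff]; rintro ⟨_, h⟩; rw [h] at h1; simp at h1)
      have f3 := find_cons_of_not_prefix ['\''] c cs
        (by rw [single_prefix_iff]; intro h; rw [h] at h1; simp at h1)
      have f4 := find_cons_of_not_prefix ['"'] c cs
        (by rw [single_prefix_iff]; intro h; rw [h] at h1; simp at h1)
      simp only [gA, fQ, f1, f2, f3, f4]
      rw [if_pos h1]
      exact (combineQ_first _ _ _ (shiftP_cases _ n2) (shiftP_cases _ n3) (shiftP_cases _ n4)).symm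
    · by_cases h2 : c = '\\' ∧ cs.head? = some '"'
      · have f2 : PySem.Chars.find (c :: cs) ['\\', '"'] = 0 :=
          find_cons_of_prefix _ _ _ ((pair_prefix_iff _ _ _ _).2 h2)
        have f1 := find_cons_of_not_prefix ['\\', '\''] c cs
          (by rw [pair_prefix_iff]; rintro ⟨hc, h⟩; exact h1 ⟨hc, h⟩)
        have f3 := find_cons_of_not_prefix ['\''] c cs
          (by rw [single_prefix_iff]; intro h; rw [h] at h2; simp at h2)
        have f4 := find_cons_of_not_prefix ['"'] c cs
          (by rw [single_prefix_iff]; intro h; rw [h] at h2; simp at h2)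
        simp only [gA, fQ, f1, f2, f3, f4]
        rw [if_neg h1, if_pos h2]
        exact (combineQ_second _ _ _ (shiftP_cases _ n1) (shiftP_cases _ n3) (shiftP_cases _ n4)).symm
      · by_cases h3 : c = '\''
        · have f3 : PySem.Chars.find (c :: cs) ['\''] = 0 :=
            find_cons_of_prefix _ _ _ ((single_prefix_iff _ _ _).2 h3)
          have f1 := find_cons_of_not_prefix ['\\', '\''] c cs
            (by rw [pair_prefix_iff]; rintro ⟨hc, _⟩; rw [h3] at hc; exact absurd hc (by decide))
          have f2 := find_cons_of_not_prefix ['\\', '"'] c cs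
            (by rw [pair_prefix_iff]; rintro ⟨hc, _⟩; rw [h3] at hc; exact absurd hc (by decide))
          have f4 := find_cons_of_not_prefix ['"'] c cs
            (by rw [single_prefix_iff]; intro h; rw [h3] at h; exact absurd h (by decide))
          simp only [gA, fQ, f1, f2, f3, f4]
          rw [if_neg h1, if_neg h2, if_pos h3]
          exact (combineQ_third _ _ _ (shiftP_cases _ n1) (shiftP_cases _ n2) (shiftP_cases _ n4)).symm
        · by_cases h4 : c = '"'
          · have f4 : PySem.Chars.find (c :: cs) ['"'] = 0 :=
              find_cons_of_prefix _ _ _ ((single_prefix_iff _ _ _).2 h4)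
            have f1 := find_cons_of_not_prefix ['\\', '\''] c cs
              (by rw [pair_prefix_iff]; rintro ⟨hc, _⟩; rw [h4] at hc; exact absurd hc (by decide))
            have f2 := find_cons_of_not_prefix ['\\', '"'] c cs
              (by rw [pair_prefix_iff]; rintro ⟨hc, _⟩; rw [h4] at hc; exact absurd hc (by decide))
            have f3 := find_cons_of_not_prefix ['\''] c cs
              (by rw [single_prefix_iff]; intro h; rw [h4] at h; exact absurd h (by decide))
            simp only [gA, fQ, f1, f2, f3, f4]
            rw [if_neg h1, if_neg h2, if_neg h3, if_pos h4]
            exact (combineQ_fourth _ _ _ (shiftP_cases _ n1) (shiftP_cases _ n2) (shiftP_cases _ n3)).symm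
          · have f1 := find_cons_of_not_prefix ['\\', '\''] c cs
              (by rw [pair_prefix_iff]; rintro ⟨hc, hh⟩; exact h1 ⟨hc, hh⟩)
            have f2 := find_cons_of_not_prefix ['\\', '"'] c cs
              (by rw [pair_prefix_iff]; rintro ⟨hc, hh⟩; exact h2 ⟨hc, hh⟩)
            have f3 := find_cons_of_not_prefix ['\''] c cs
              (by rw [single_prefix_iff]; exact h3)
            have f4 := find_cons_of_not_prefix ['"'] c cs
              (by rw [single_prefix_iff]; exact h4)
            simp only [gA, fQ, f1, f2, f3, f4]
            rw [if_neg h1, if_neg h2, if_neg h3, if_neg h4]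
            rw [combineQ_shift _ _ _ _ n1 n2 n3 n4]
            exact ih

-- ===== VERDICT (by name: the statement is the Claim_ definition above) =====
theorem quotify_py_spec : Claim_equal_quotify_py := by
  intro mystr _
  unfold Spec_quotify_py quotify_py quotify_py_alt
  have hA := quotifyALoop_eq_gA "\"" mystr.toList []
  simp only [List.nil_append, List.length_nil, Nat.cast_zero, zero_add] at hA
  simp only [PySem.Str.len_eq, PySem.Str.find_eq]
  rw [hA, gA_eq_fQ]
  rfl
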